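-- pv_equiv track=rewrite | github.com/moollaza/status-monitor | scripts/discover-services.py | make_catalog_entry
-- ===== SOURCE A (Python) =====
-- def make_catalog_entry(name, result, category="Uncategorized"):
--     """Create a catalog.json entry from discovery result."""
--     slug = name.lower().replace(" ", "-").replace(".", "-").replace("/", "-")
--     # Clean up consecutive hyphens
--     while "--" in slug:
--         slug = slug.replace("--", "-")
--     slug = slug.strip("-")
--
--     return {
--         "id": slug,
--         "name": name,
--         "base_url": result["url"],
--         "type": "statuspage",
--         "category": category,
--         "platform": result["platform"],
--     }
-- ===== SOURCE B (Python) =====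
-- def make_catalog_entry(name, result, category="Uncategorized"):
--     """Create a catalog.json entry from discovery result (single-pass slug build)."""
--     out = []
--     for c in name.lower():
--         if c in " ./-":
--             if out and out[-1] != "-":
--                 out.append("-")
--         else:
--             out.append(c)
--     if out and out[-1] == "-":
--         out.pop()
--     return {
--         "id": "".join(out),
--         "name": name,
--         "base_url": result["url"],
--         "type": "statuspage",
--         "category": category,
--         "platform": result["platform"],
--     }
-- ===== Notes on version B (the rewrite author's own statement) =====
-- stated objective: alternative
-- what changed: B builds the slug in a single character pass over name.lower() with a last-emitted-char state that collapses hyphen runs inline and never emits a leading hyphen (popping at most one trailing one), replacing A's three chained full-string replaces plus a rescan-until-fixpoint '--' collapse loop and a final strip.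
import Mathlib
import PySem

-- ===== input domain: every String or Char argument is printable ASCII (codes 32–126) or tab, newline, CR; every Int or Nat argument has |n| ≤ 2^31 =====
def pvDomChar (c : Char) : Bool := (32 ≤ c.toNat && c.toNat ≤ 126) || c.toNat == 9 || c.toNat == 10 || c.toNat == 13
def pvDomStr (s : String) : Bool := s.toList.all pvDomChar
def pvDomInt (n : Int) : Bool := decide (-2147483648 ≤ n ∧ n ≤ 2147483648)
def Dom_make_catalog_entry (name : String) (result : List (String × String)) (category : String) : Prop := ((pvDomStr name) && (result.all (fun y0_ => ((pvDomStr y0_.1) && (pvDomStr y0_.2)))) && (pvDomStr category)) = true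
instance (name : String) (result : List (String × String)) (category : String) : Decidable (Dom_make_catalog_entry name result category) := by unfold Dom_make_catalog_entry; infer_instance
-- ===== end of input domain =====

-- B builds the slug in one character pass with inline hyphen-run collapsing instead of
-- A's chained replaces plus a collapse-to-fixpoint rescan loop (objective: alternative).

-- ===== PORT A =====
-- termination lemmas for A's `while "--" in slug` loop (cited by `decreasing_by`)
theorem pv_go_len_le (fuel : Nat) : ∀ (l acc : List Char),
    (PySem.Chars.replace.go ['-', '-'] ['-'] fuel l acc).length ≤ acc.length + l.length := by
  induction fuel with
  | zero => intro l acc; simp [PySem.Chars.replace.go]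
  | succ fuel ih =>
    intro l acc
    cases l with
    | nil => simp [PySem.Chars.replace.go]
    | cons c t =>
      rw [PySem.Chars.replace.go]
      split
      · refine le_trans (ih _ _) ?_
        simp at *
        omega
      · refine le_trans (ih _ _) ?_
        simp
        omega

theorem pv_go_len_lt (fuel : Nat) : ∀ (l acc : List Char), l.length ≤ fuel →
    PySem.Chars.isIn ['-', '-'] l = true →
    (PySem.Chars.replace.go ['-', '-'] ['-'] fuel l acc).length < acc.length + l.length := by
  induction fuel with
  | zero =>
    intro l acc hf h
    have hl : l = [] := List.length_eq_zero_iff.mp (Nat.le_zero.mp hf)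
    subst hl
    exact absurd h (by decide)
  | succ fuel ih =>
    intro l acc hf h
    cases l with
    | nil => exact absurd h (by decide)
    | cons c t =>
      rw [PySem.Chars.replace.go]
      split
      · rename_i hp
        have h2 : (2 : Nat) ≤ (c :: t).length := by
          have := (List.isPrefixOf_iff_prefix.mp hp).length_le
          simpa using this
        refine lt_of_le_of_lt (pv_go_len_le _ _ _) ?_
        simp at *
        omega
      · rename_i hp
        have ht : PySem.Chars.isIn ['-', '-'] t = true := by
          obtain ⟨j, hj⟩ := (PySem.Chars.exists_prefix_drop_iff_isIn _ _).mpr h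
          cases j with
          | zero =>
            have hj' : (['-', '-'] : List Char) <+: (c :: t) := by simpa using hj
            exact absurd (List.isPrefixOf_iff_prefix.mpr hj') hp
          | succ k =>
            refine (PySem.Chars.exists_prefix_drop_iff_isIn _ _).mp ⟨k, ?_⟩
            simpa [List.drop_succ_cons] using hj
        have hf' : t.length ≤ fuel := by simp at hf; omega
        have := ih t (c :: acc) hf' ht
        simp at this ⊢
        omega

theorem pv_replace_dd_len_lt (s : String) (h : PySem.Str.isIn "--" s = true) :
    (PySem.Str.replace s "--" "-").toList.length < s.toList.length := by
  have h' : PySem.Chars.isIn ['-', '-'] s.toList = true := by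
    rw [PySem.Str.isIn_eq, show ("--" : String).toList = ['-', '-'] from rfl] at h
    exact h
  rw [PySem.Str.toList_replace, show ("--" : String).toList = ['-', '-'] from rfl,
    show ("-" : String).toList = ['-'] from rfl, PySem.Chars.replace,
    if_neg (by decide : ¬((['-', '-'] : List Char).isEmpty = true))]
  have := pv_go_len_lt s.toList.length s.toList [] le_rfl h'
  simpa using this

-- the `while "--" in slug: slug = slug.replace("--", "-")` loop of A
def collapseA (s : String) : String :=
  if h : PySem.Str.isIn "--" s = true then collapseA (PySem.Str.replace s "--" "-") else s
termination_by s.toList.length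
decreasing_by exact pv_replace_dd_len_lt s h

def make_catalog_entry (name : String) (result : List (String × String)) (category : String) : List (String × String) :=
  let slug0 := PySem.Str.replace (PySem.Str.replace (PySem.Str.replace (PySem.Str.lower name) " " "-") "." "-") "/" "-"
  let slug1 := collapseA slug0
  let slug := PySem.Str.stripChars slug1 "-"
  [("id", slug),
   ("name", name),
   ("base_url", (PySem.Dict.get? (PySem.Dict.mk result) "url").getD ""),
   ("type", "statuspage"),
   ("category", category),
   ("platform", (PySem.Dict.get? (PySem.Dict.mk result) "platform").getD "")]

-- ===== PORT B =====
-- one pass over the lowered name: emit '-' for ' ', '.', '/', '-' only when the last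
-- emitted char is not already '-'; finally drop a single trailing '-'
def slugB (cs : List Char) : List Char :=
  let out := cs.foldl (fun out c =>
    if c = ' ' ∨ c = '.' ∨ c = '/' ∨ c = '-' then
      if out ≠ [] ∧ out.getLast? ≠ some '-' then out ++ ['-'] else out
    else out ++ [c]) []
  if out.getLast? = some '-' then out.dropLast else out

def make_catalog_entry_alt (name : String) (result : List (String × String)) (category : String) : List (String × String) :=
  let slug := String.ofList (slugB (PySem.Str.lower name).toList)
  [("id", slug),
   ("name", name),
   ("base_url", (PySem.Dict.get? (PySem.Dict.mk result) "url").getD ""),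
   ("type", "statuspage"),
   ("category", category),
   ("platform", (PySem.Dict.get? (PySem.Dict.mk result) "platform").getD "")]

-- ===== PRECONDITION & SPEC =====
-- Pre_ excludes inputs where Python A raises KeyError: result must carry both keys.
def Pre_make_catalog_entry (name : String) (result : List (String × String)) (category : String) : Prop :=
  "url" ∈ result.map Prod.fst ∧ "platform" ∈ result.map Prod.fst
instance (name : String) (result : List (String × String)) (category : String) : Decidable (Pre_make_catalog_entry name result category) := by unfold Pre_make_catalog_entry; infer_instance

def pvWitness_make_catalog_entry : String × (List (String × String)) × String :=
  ("My Service", [("url", "https://x.example"), ("platform", "statuspage")], "Infra")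

def Spec_make_catalog_entry (name : String) (result : List (String × String)) (category : String) (out : List (String × String)) : Prop := out = make_catalog_entry_alt name result category
instance (name : String) (result : List (String × String)) (category : String) (out : List (String × String)) : Decidable (Spec_make_catalog_entry name result category out) := by unfold Spec_make_catalog_entry; infer_instance

-- ===== CLAIM (what is proved, stated in full; the proofs are below) =====
def Claim_equal_make_catalog_entry : Prop := ∀ (name : String) (result : List (String × String)) (category : String), Dom_make_catalog_entry name result category → Pre_make_catalog_entry name result category → Spec_make_catalog_entry name result category (make_catalog_entry name result category)

-- ===== LEMMAS AND PROOFS =====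

-- substitution A performs with its three chained single-char replaces
def subC (c : Char) : Char := if c = ' ' ∨ c = '.' ∨ c = '/' then '-' else c

-- canonical collapse of adjacent hyphen pairs
def squeeze : List Char → List Char
  | [] => []
  | [c] => [c]
  | a :: b :: t => if a = '-' ∧ b = '-' then squeeze (b :: t) else a :: squeeze (b :: t)

-- one left-to-right pass of  slug.replace("--", "-")
def repDD : List Char → List Char
  | [] => []
  | c :: t =>
    if c = '-' ∧ t.head? = some '-' then '-' :: repDD t.tail else c :: repDD t
termination_by l => l.length
decreasing_by
  all_goals (simp [List.length_tail]; try omega)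

def dhL (l : List Char) : List Char := if l.head? = some '-' then l.tail else l
def rtL (l : List Char) : List Char := if l.getLast? = some '-' then l.dropLast else l

-- state machine of B's single pass (state = last emitted char / not started)
def bgo : Char → List Char → List Char
  | _, [] => []
  | last, d :: m =>
    if d = '-' then (if last = '-' then bgo last m else '-' :: bgo '-' m)
    else d :: bgo d m

def bstart : List Char → List Char
  | [] => []
  | d :: m => if d = '-' then bstart m else d :: bgo d m

def RH : Char → Char → Prop := fun a b => ¬(a = '-' ∧ b = '-')

theorem pv_go_single (a : Char) (fuel : Nat) (l acc : List Char) (hf : l.length ≤ fuel) :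
    PySem.Chars.replace.go [a] ['-'] fuel l acc
      = acc.reverse ++ l.map (fun c => if c = a then '-' else c) := by
  induction fuel generalizing l acc with
  | zero =>
    have hl : l = [] := List.length_eq_zero_iff.mp (Nat.le_zero.mp hf)
    subst hl
    simp [PySem.Chars.replace.go]
  | succ fuel ih =>
    cases l with
    | nil => simp [PySem.Chars.replace.go]
    | cons c t =>
      have hf' : t.length ≤ fuel := by simp at hf; omega
      rw [PySem.Chars.replace.go]
      split
      · rename_i hp
        have hca : c = a := by
          have := List.isPrefixOf_iff_prefix.mp hp
          simp [List.cons_prefix_cons] at this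
          exact this.symm
        rw [show (List.drop [a].length (c :: t)) = t by simp, ih _ _ hf']
        simp [hca]
      · rename_i hp
        have hca : ¬(c = a) := by
          intro hca
          exact hp (List.isPrefixOf_iff_prefix.mpr (by simp [List.cons_prefix_cons, hca]))
        rw [ih _ _ hf']
        simp [hca]

theorem pv_replace_single (a : Char) (l : List Char) :
    PySem.Chars.replace l [a] ['-'] = l.map (fun c => if c = a then '-' else c) := by
  rw [PySem.Chars.replace, if_neg (by simp : ¬(([a] : List Char).isEmpty = true)),
    pv_go_single a l.length l [] le_rfl]
  simp

theorem pv_map3 (l : List Char) :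
    ((l.map (fun c => if c = ' ' then '-' else c)).map (fun c => if c = '.' then '-' else c)).map
        (fun c => if c = '/' then '-' else c) = l.map subC := by
  simp only [List.map_map]
  refine List.map_congr_left ?_
  intro c _
  simp only [Function.comp_apply, subC]
  by_cases h1 : c = ' ' <;> by_cases h2 : c = '.' <;> by_cases h3 : c = '/' <;>
    simp_all

theorem pv_ddPrefix (c : Char) (t : List Char) :
    (['-', '-'] <+: (c :: t)) ↔ (c = '-' ∧ t.head? = some '-') := by
  cases t with
  | nil => simp [List.cons_prefix_cons]
  | cons b t' => simp [List.cons_prefix_cons, eq_comm]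

theorem pv_go_dd (fuel : Nat) (l acc : List Char) (hf : l.length ≤ fuel) :
    PySem.Chars.replace.go ['-', '-'] ['-'] fuel l acc = acc.reverse ++ repDD l := by
  induction fuel generalizing l acc with
  | zero =>
    have hl : l = [] := List.length_eq_zero_iff.mp (Nat.le_zero.mp hf)
    subst hl
    simp [PySem.Chars.replace.go, repDD]
  | succ fuel ih =>
    cases l with
    | nil => simp [PySem.Chars.replace.go, repDD]
    | cons c t =>
      rw [PySem.Chars.replace.go, repDD]
      split
      · rename_i hp
        have hdd := (pv_ddPrefix c t).mp (List.isPrefixOf_iff_prefix.mp hp)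
        have hf' : t.tail.length ≤ fuel := by
          simp [List.length_tail] at *
          omega
        rw [show (List.drop (['-', '-'] : List Char).length (c :: t)) = t.tail by
              simp [List.drop_succ_cons, List.drop_one],
          ih _ _ hf', if_pos hdd]
        simp
      · rename_i hp
        have hdd : ¬(c = '-' ∧ t.head? = some '-') := fun hdd =>
          hp (List.isPrefixOf_iff_prefix.mpr ((pv_ddPrefix c t).mpr hdd))
        have hf' : t.length ≤ fuel := by simp at hf; omega
        rw [ih _ _ hf', if_neg hdd]
        simp

theorem pv_replace_dd (l : List Char) :
    PySem.Chars.replace l ['-', '-'] ['-'] = repDD l := by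
  rw [PySem.Chars.replace, if_neg (by decide : ¬((['-', '-'] : List Char).isEmpty = true)),
    pv_go_dd l.length l [] le_rfl]
  simp

theorem pv_head_repDD (l : List Char) : (repDD l).head? = l.head? := by
  cases l with
  | nil => simp [repDD]
  | cons c t => rw [repDD]; split <;> simp_all

theorem pv_squeeze_cons (c : Char) (l : List Char) :
    squeeze (c :: l) = if c = '-' ∧ l.head? = some '-' then squeeze l else c :: squeeze l := by
  cases l with
  | nil => simp [squeeze]
  | cons b t => rw [squeeze]; simp

theorem pv_head_squeeze (l : List Char) : (squeeze l).head? = l.head? := by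
  fun_induction squeeze with
  | case1 => rfl
  | case2 c => rfl
  | case3 a b t hab ih => simp_all
  | case4 a b t hab ih => simp

theorem pv_squeeze_repDD (l : List Char) : squeeze (repDD l) = squeeze l := by
  fun_induction repDD with
  | case1 => rfl
  | case2 c t hc ih =>
    obtain ⟨hc1, hc2⟩ := hc
    subst hc1
    cases t with
    | nil => simp at hc2
    | cons b t' =>
      have hb : b = '-' := by simpa using hc2
      subst hb
      simp only [List.tail_cons] at ih ⊢
      rw [pv_squeeze_cons '-' (repDD t'), pv_head_repDD]
      rw [show squeeze ('-' :: '-' :: t') = squeeze ('-' :: t') from by rw [squeeze]; simp,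
        pv_squeeze_cons '-' t']
      by_cases h : t'.head? = some '-' <;> simp_all
  | case3 c t hc ih =>
    rw [pv_squeeze_cons c (repDD t), pv_head_repDD, pv_squeeze_cons c t]
    by_cases h : c = '-' ∧ t.head? = some '-' <;> simp_all

theorem pv_squeeze_fix (l : List Char) (h : PySem.Chars.isIn ['-', '-'] l = false) :
    squeeze l = l := by
  fun_induction squeeze with
  | case1 => rfl
  | case2 c => rfl
  | case3 a b t hab ih =>
    exfalso
    obtain ⟨ha, hb⟩ := hab
    subst ha; subst hb
    rw [PySem.Chars.isIn_eq_false_iff] at h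
    exact h (List.IsPrefix.isInfix ⟨t, rfl⟩)
  | case4 a b t hab ih =>
    rw [PySem.Chars.isIn_eq_false_iff] at h
    have hbt : PySem.Chars.isIn ['-', '-'] (b :: t) = false := by
      rw [PySem.Chars.isIn_eq_false_iff]
      exact fun hi => h (List.infix_cons hi)
    rw [ih hbt]

theorem pv_collapseA (s : String) : (collapseA s).toList = squeeze s.toList := by
  fun_induction collapseA with
  | case1 s h ih =>
    rw [ih, PySem.Str.toList_replace, show ("--" : String).toList = ['-', '-'] from rfl,
      show ("-" : String).toList = ['-'] from rfl, pv_replace_dd, pv_squeeze_repDD]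
  | case2 s h =>
    have h' : PySem.Chars.isIn ['-', '-'] s.toList = false := by
      rw [Bool.not_eq_true] at h
      rw [PySem.Str.isIn_eq, show ("--" : String).toList = ['-', '-'] from rfl] at h
      exact h
    exact (pv_squeeze_fix s.toList h').symm

theorem pv_squeeze_chain (l : List Char) : List.IsChain RH (squeeze l) := by
  fun_induction squeeze with
  | case1 => exact List.isChain_nil
  | case2 c => exact List.isChain_singleton c
  | case3 a b t hab ih => exact ih
  | case4 a b t hab ih =>
    cases hsq : squeeze (b :: t) with
    | nil => exact List.isChain_singleton a
    | cons x xs =>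
      have hx : x = b := by
        have := pv_head_squeeze (b :: t)
        rw [hsq] at this
        simpa using this
      rw [hsq] at ih
      subst hx
      exact List.isChain_cons_cons.mpr ⟨hab, ih⟩

theorem pv_dw (l : List Char) (h : List.IsChain RH l) :
    List.dropWhile (fun c => ['-'].contains c) l = dhL l := by
  cases l with
  | nil => rfl
  | cons a t =>
    rw [List.dropWhile_cons]
    by_cases ha : a = '-'
    · subst ha
      rw [if_pos (by decide)]
      cases t with
      | nil => simp [dhL]
      | cons b t' =>
        have hb : b ≠ '-' := by
          have := (List.isChain_cons_cons.mp h).1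
          unfold RH at this
          tauto
        rw [List.dropWhile_cons, if_neg (by simpa using hb)]
        simp [dhL]
    · rw [if_neg (by simpa using ha)]
      simp [dhL, ha]

theorem pv_revdh (r : List Char) : (dhL r.reverse).reverse = rtL r := by
  unfold dhL rtL
  rw [List.head?_reverse]
  by_cases h : r.getLast? = some '-' <;> simp [h, List.tail_reverse]

theorem pv_strip (l : List Char) (h : List.IsChain RH l) :
    PySem.Chars.stripChars l ['-'] = rtL (dhL l) := by
  simp only [PySem.Chars.stripChars]
  rw [pv_dw l h]
  have h2 : List.IsChain RH (dhL l) := by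
    unfold dhL
    split
    · exact h.tail
    · exact h
  have h3 : List.IsChain RH (dhL l).reverse := by
    rw [List.isChain_reverse]
    exact h2.imp (fun a b hab => by unfold RH at *; tauto)
  rw [pv_dw _ h3, pv_revdh]

theorem pv_B1 (m : List Char) : ∀ (out : List Char) (c : Char), out.getLast? = some c →
    m.foldl (fun out c =>
      if c = '-' then
        if out ≠ [] ∧ out.getLast? ≠ some '-' then out ++ ['-'] else out
      else out ++ [c]) out = out ++ bgo c m := by
  induction m with
  | nil => intro out c h; simp [bgo]
  | cons d m ih =>
    intro out c h
    have hne : out ≠ [] := by rintro rfl; simp at h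
    rw [List.foldl_cons, bgo]
    by_cases hd : d = '-'
    · subst hd
      rw [if_pos rfl, if_pos rfl]
      by_cases hc : c = '-'
      · subst hc
        rw [if_neg (by simp [h]), if_pos rfl, ih out '-' h]
      · rw [if_pos ⟨hne, by simp [h, hc]⟩, if_neg hc,
          ih (out ++ ['-']) '-' List.getLast?_concat]
        simp
    · rw [if_neg hd, if_neg hd, ih (out ++ [d]) d List.getLast?_concat]
      simp

theorem pv_B2 (m : List Char) :
    m.foldl (fun out c =>
      if c = '-' then
        if out ≠ [] ∧ out.getLast? ≠ some '-' then out ++ ['-'] else out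
      else out ++ [c]) [] = bstart m := by
  induction m with
  | nil => rfl
  | cons d m ih =>
    rw [List.foldl_cons, bstart]
    by_cases hd : d = '-'
    · subst hd
      rw [if_pos rfl, if_pos rfl, if_neg (by simp), ih]
    · rw [if_neg hd, if_neg hd]
      have : ([] : List Char) ++ [d] = [d] := rfl
      rw [this, pv_B1 m [d] d (by simp)]
      rfl

theorem pv_bgo (m : List Char) :
    (∀ c, c ≠ '-' → bgo c m = squeeze m) ∧ bgo '-' m = dhL (squeeze m) := by
  induction m with
  | nil => exact ⟨fun c _ => rfl, by simp [bgo, squeeze, dhL]⟩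
  | cons d m ih =>
    obtain ⟨ih1, ih2⟩ := ih
    by_cases hd : d = '-'
    · subst hd
      constructor
      · intro c hc
        rw [bgo, if_pos rfl, if_neg hc, ih2, pv_squeeze_cons]
        by_cases hm : m.head? = some '-'
        · rw [if_pos ⟨rfl, hm⟩]
          cases hsq : squeeze m with
          | nil =>
            have hh := pv_head_squeeze m
            rw [hsq, hm] at hh
            simp at hh
          | cons x xs =>
            have hx : x = '-' := by
              have := pv_head_squeeze m
              rw [hsq, hm] at this
              simpa using this
            subst hx
            simp [dhL]
        · rw [if_neg (by simp [hm])]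
          rw [dhL, if_neg (by rw [pv_head_squeeze]; exact hm)]
      · rw [bgo, if_pos rfl, if_pos rfl, ih2, pv_squeeze_cons]
        by_cases hm : m.head? = some '-'
        · rw [if_pos ⟨rfl, hm⟩]
        · rw [if_neg (by simp [hm])]
          rw [dhL, if_neg (by rw [pv_head_squeeze]; exact hm),
            dhL, if_pos (by simp), List.tail_cons]
    · constructor
      · intro c _
        rw [bgo, if_neg hd, ih1 d hd, pv_squeeze_cons, if_neg (by simp [hd])]
      · rw [bgo, if_neg hd, ih1 d hd, pv_squeeze_cons, if_neg (by simp [hd]),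
          dhL, if_neg (by simp [hd])]

theorem pv_bstart (m : List Char) : bstart m = dhL (squeeze m) := by
  induction m with
  | nil => simp [bstart, squeeze, dhL]
  | cons d m ih =>
    by_cases hd : d = '-'
    · subst hd
      rw [bstart, if_pos rfl, ih, pv_squeeze_cons]
      by_cases hm : m.head? = some '-'
      · rw [if_pos ⟨rfl, hm⟩]
      · rw [if_neg (by simp [hm]),
          dhL, if_neg (by rw [pv_head_squeeze]; exact hm),
          dhL, if_pos (by simp), List.tail_cons]
    · rw [bstart, if_neg hd, (pv_bgo m).1 d hd, pv_squeeze_cons, if_neg (by simp [hd]),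
        dhL, if_neg (by simp [hd])]

theorem pv_foldmap (l : List Char) :
    l.foldl (fun out c =>
      if c = ' ' ∨ c = '.' ∨ c = '/' ∨ c = '-' then
        if out ≠ [] ∧ out.getLast? ≠ some '-' then out ++ ['-'] else out
      else out ++ [c]) []
    = (l.map subC).foldl (fun out c =>
      if c = '-' then
        if out ≠ [] ∧ out.getLast? ≠ some '-' then out ++ ['-'] else out
      else out ++ [c]) [] := by
  rw [List.foldl_map]
  congr 1
  funext out c
  by_cases h1 : c = ' ' <;> by_cases h2 : c = '.' <;> by_cases h3 : c = '/' <;>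
    by_cases h4 : c = '-' <;> simp_all [subC]

theorem pv_slug_eq (t : String) :
    (PySem.Str.stripChars
        (collapseA (PySem.Str.replace (PySem.Str.replace (PySem.Str.replace t " " "-") "." "-") "/" "-"))
        "-").toList = slugB t.toList := by
  rw [PySem.Str.toList_stripChars, pv_collapseA, show ("-" : String).toList = ['-'] from rfl,
    PySem.Str.toList_replace, PySem.Str.toList_replace, PySem.Str.toList_replace,
    show (" " : String).toList = [' '] from rfl, show ("." : String).toList = ['.'] from rfl,
    show ("/" : String).toList = ['/'] from rfl, show ("-" : String).toList = ['-'] from rfl,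
    pv_replace_single, pv_replace_single, pv_replace_single, pv_map3,
    pv_strip _ (pv_squeeze_chain _)]
  simp only [slugB]
  rw [pv_foldmap, pv_B2, pv_bstart]
  rfl

-- ===== VERDICT (by name: the statement is the Claim_ definition above) =====
theorem make_catalog_entry_spec : Claim_equal_make_catalog_entry := by
  intro name result category _ _
  simp only [Spec_make_catalog_entry, make_catalog_entry, make_catalog_entry_alt]
  have hs : PySem.Str.stripChars
      (collapseA (PySem.Str.replace (PySem.Str.replace (PySem.Str.replace (PySem.Str.lower name) " " "-") "." "-") "/" "-")) "-"
      = String.ofList (slugB (PySem.Str.lower name).toList) := by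
    apply String.ext
    rw [String.toList_ofList, pv_slug_eq]
  rw [hs]
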